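-- pv_equiv track=rewrite | github.com/5up3rc/NagaScan | www/reform.py | VbsString
-- ===== SOURCE A (Python) =====
-- def VbsString(strInput, default=''):
--
-- 	if strInput == None or len(strInput) == 0:
-- 		strInput = default
--
-- 		if strInput == None or len(strInput) == 0:
-- 			return '""'
--
-- 	# Allow: a-z A-Z 0-9 SPACE , .
-- 	# Allow (dec): 97-122 65-90 48-57 32 44 46
--
-- 	out = ''
-- 	inStr = 0	# Boolean (0 false, 1 true)
-- 				# Using numerical for backwards
-- 				# compatability
--
-- 	for char in strInput:
-- 		c = ord(char)
-- 		if ((c >= 97 and c <= 122) or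
-- 			(c >= 65 and c <= 90 ) or
-- 			(c >= 48 and c <= 57 ) or
-- 			c == 32 or c == 44 or c == 46):
--
-- 			if inStr == 0:
-- 				inStr = 1
-- 				out += '&"'
--
-- 			out += char
-- 		else:
-- 			if inStr == 0:
-- 				out += "&chrw(%d)" % c
-- 			else:
-- 				inStr = 0
-- 				out += "\"&chrw(%d)" % c
--
-- 	if inStr == 1:
-- 		out += '"'
--
-- 	return out.lstrip('&')
-- ===== SOURCE B (Python) =====
-- # B: run-based decomposition — group the input into maximal allowed/disallowed runs
-- # and render each run whole, instead of A's per-character inStr state machine.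
-- def _ok(c):
--     o = ord(c)
--     return 97 <= o <= 122 or 65 <= o <= 90 or 48 <= o <= 57 or o in (32, 44, 46)
--
-- def VbsString(strInput, default=''):
--     s = strInput or default
--     if not s:
--         return '""'
--     parts = []
--     i, n = 0, len(s)
--     while i < n:
--         a = _ok(s[i])
--         j = i + 1
--         while j < n and _ok(s[j]) == a:
--             j += 1
--         run = s[i:j]
--         if a:
--             parts.append('&"' + run + '"')
--         else:
--             parts.append(''.join('&chrw(%d)' % ord(c) for c in run))
--         i = j
--     return ''.join(parts).lstrip('&')
-- ===== Notes on version B (the rewrite author's own statement) =====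
-- stated objective: alternative
-- what changed: Replaced A's per-character inStr state machine with a run-grouping pass: the string is split into maximal allowed/disallowed runs, each run is rendered whole as one quoted piece or a chain of chrw calls, and the pieces are joined and left-stripped of the leading ampersand.
import Mathlib
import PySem

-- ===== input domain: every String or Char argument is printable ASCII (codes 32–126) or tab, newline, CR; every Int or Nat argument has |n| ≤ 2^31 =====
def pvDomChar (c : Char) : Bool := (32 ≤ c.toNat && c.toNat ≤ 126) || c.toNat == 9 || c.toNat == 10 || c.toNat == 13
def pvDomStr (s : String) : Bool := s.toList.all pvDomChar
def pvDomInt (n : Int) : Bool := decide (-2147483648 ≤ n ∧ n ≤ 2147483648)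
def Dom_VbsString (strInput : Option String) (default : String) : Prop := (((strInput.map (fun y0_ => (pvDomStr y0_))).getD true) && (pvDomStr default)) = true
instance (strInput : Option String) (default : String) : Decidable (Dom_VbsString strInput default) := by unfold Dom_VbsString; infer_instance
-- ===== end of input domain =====

-- ===== PORT A =====
-- B changes only the decomposition (maximal runs instead of a per-char state machine); same value everywhere.
-- allow test: a-z A-Z 0-9 SPACE , .
def pvAllowed (c : Nat) : Bool :=
  (97 ≤ c && c ≤ 122) || (65 ≤ c && c ≤ 90) || (48 ≤ c && c ≤ 57) || c == 32 || c == 44 || c == 46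

def VbsString (strInput : Option String) (default : String) : String :=
  -- if strInput == None or len(strInput) == 0: strInput = default
  let s := match strInput with
    | none => default
    | some t => if t.toList.length = 0 then default else t
  if s.toList.length = 0 then "\"\""
  else
    let st := s.toList.foldl (fun (st : List Char × Int) char =>
      let out := st.1
      let inStr := st.2
      let c := char.toNat
      if pvAllowed c then
        if inStr = 0 then (out ++ ['&', '"'] ++ [char], 1)
        else (out ++ [char], inStr)
      else
        if inStr = 0 then
          (out ++ ('&' :: 'c' :: 'h' :: 'r' :: 'w' :: '(' :: (PySem.Int.toChars (c : Int) ++ [')'])), inStr)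
        else
          (out ++ ('"' :: '&' :: 'c' :: 'h' :: 'r' :: 'w' :: '(' :: (PySem.Int.toChars (c : Int) ++ [')'])), 0)
      ) (([], 0) : List Char × Int)
    let out := if st.2 = (1 : Int) then st.1 ++ ['"'] else st.1
    -- out.lstrip('&') : strips every leading '&' (exact for a one-char strip set)
    String.mk (out.dropWhile (· = '&'))

-- ===== PORT B =====
def altOk (c : Char) : Bool :=
  let o := c.toNat
  (97 ≤ o && o ≤ 122) || (65 ≤ o && o ≤ 90) || (48 ≤ o && o ≤ 57) || o == 32 || o == 44 || o == 46

-- the inner while-loops of Source B: maximal runs of equal altOk-class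
def altChunks : List Char → List (List Char)
  | [] => []
  | c :: cs =>
    let p := cs.span (fun d => altOk d == altOk c)
    (c :: p.1) :: altChunks p.2
  termination_by l => l.length
  decreasing_by
    simp only [List.span_eq_takeWhile_dropWhile, List.length_cons]
    exact Nat.lt_succ_of_le (List.length_dropWhile_le _ _)

-- '&chrw(%d)' % ord(c)
def altChrw (c : Char) : List Char :=
  '&' :: 'c' :: 'h' :: 'r' :: 'w' :: '(' :: PySem.Int.toChars (c.toNat : Int) ++ [')']

def altRender (run : List Char) : List Char :=
  if altOk (run.headD ' ') then '&' :: '"' :: (run ++ ['"'])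
  else (run.map altChrw).flatten

def VbsString_alt (strInput : Option String) (default : String) : String :=
  -- s = strInput or default
  let s := match strInput with
    | none => default
    | some t => if t.toList.isEmpty then default else t
  if s.toList.isEmpty then "\"\""
  else String.mk ((((altChunks s.toList).map altRender).flatten).dropWhile (· = '&'))

-- ===== PRECONDITION & SPEC =====
def Spec_VbsString (strInput : Option String) (default : String) (out : String) : Prop := out = VbsString_alt strInput default
instance (strInput : Option String) (default : String) (out : String) : Decidable (Spec_VbsString strInput default out) := by unfold Spec_VbsString; infer_instance

-- ===== CLAIM (what is proved, stated in full; the proofs are below) =====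
def Claim_equal_VbsString : Prop := ∀ (strInput : Option String) (default : String), Dom_VbsString strInput default → Spec_VbsString strInput default (VbsString strInput default)

-- ===== LEMMAS AND PROOFS =====

-- the common rendering, per character with an "inside string literal" flag
def pvF : List Char → Bool → List Char
  | [], b => if b then ['"'] else []
  | c :: cs, b =>
    if altOk c then (if b then [] else ['&', '"']) ++ [c] ++ pvF cs true
    else (if b then ['"'] else []) ++ altChrw c ++ pvF cs false

theorem pvAllowed_eq (c : Char) : pvAllowed c.toNat = altOk c := rfl

-- A's fold, started from any accumulator, appends exactly pvF
theorem foldA_eq (l : List Char) : ∀ (out : List Char) (b : Bool),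
    (let st := l.foldl (fun (st : List Char × Int) char =>
      let out := st.1
      let inStr := st.2
      let c := char.toNat
      if pvAllowed c then
        if inStr = 0 then (out ++ ['&', '"'] ++ [char], 1)
        else (out ++ [char], inStr)
      else
        if inStr = 0 then
          (out ++ ('&' :: 'c' :: 'h' :: 'r' :: 'w' :: '(' :: (PySem.Int.toChars (c : Int) ++ [')'])), inStr)
        else
          (out ++ ('"' :: '&' :: 'c' :: 'h' :: 'r' :: 'w' :: '(' :: (PySem.Int.toChars (c : Int) ++ [')'])), 0)
      ) (out, if b then 1 else 0)
     (if st.2 = 1 then st.1 ++ ['"'] else st.1)) = out ++ pvF l b := by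
  induction l with
  | nil => intro out b; cases b <;> simp [pvF]
  | cons c cs ih =>
    intro out b
    by_cases h : altOk c = true <;> cases b
    · simpa [pvF, pvAllowed_eq, h, List.append_assoc] using ih (out ++ ['&', '"'] ++ [c]) true
    · simpa [pvF, pvAllowed_eq, h, List.append_assoc] using ih (out ++ [c]) true
    · simpa [pvF, pvAllowed_eq, h, altChrw, List.append_assoc] using
        ih (out ++ '&' :: 'c' :: 'h' :: 'r' :: 'w' :: '(' :: (PySem.Int.toChars (c.toNat : Int) ++ [')'])) false
    · simpa [pvF, pvAllowed_eq, h, altChrw, List.append_assoc] using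
        ih (out ++ '"' :: '&' :: 'c' :: 'h' :: 'r' :: 'w' :: '(' :: (PySem.Int.toChars (c.toNat : Int) ++ [')'])) false

theorem pvF_true_of_head_not_ok (l : List Char)
    (h : ∀ c ∈ l.head?, altOk c = false) :
    pvF l true = '"' :: pvF l false := by
  cases l with
  | nil => simp [pvF]
  | cons c cs =>
    have hc : altOk c = false := h c rfl
    simp [pvF, hc]

theorem pvF_true_run (run rest : List Char) (h : ∀ c ∈ run, altOk c = true) :
    pvF (run ++ rest) true = run ++ pvF rest true := by
  induction run with
  | nil => simp
  | cons c cs ih =>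
    have hc := h c (by simp)
    simp only [List.cons_append, pvF, hc]
    simp [ih (fun d hd => h d (by simp [hd]))]

theorem pvF_false_run (run rest : List Char) (h : ∀ c ∈ run, altOk c = false) :
    pvF (run ++ rest) false = (run.map altChrw).flatten ++ pvF rest false := by
  induction run with
  | nil => simp
  | cons c cs ih =>
    have hc := h c (by simp)
    simp only [List.cons_append, pvF, hc]
    simp [ih (fun d hd => h d (by simp [hd])), List.append_assoc]

theorem chunks_eq_pvF_aux : ∀ (n : Nat) (l : List Char), l.length ≤ n →
    ((altChunks l).map altRender).flatten = pvF l false := by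
  intro n
  induction n with
  | zero =>
    intro l hl
    have : l = [] := List.eq_nil_of_length_eq_zero (Nat.le_zero.mp hl)
    subst this; simp [altChunks, pvF]
  | succ n ih =>
    intro l hl
    cases l with
    | nil => simp [altChunks, pvF]
    | cons c cs =>
      rw [altChunks]
      simp only [List.span_eq_takeWhile_dropWhile]
      set q := fun d => altOk d == altOk c with hq
      set t := cs.takeWhile q with ht
      set r := cs.dropWhile q with hrdef
      have hcs : t ++ r = cs := List.takeWhile_append_dropWhile
      have hr : ((altChunks r).map altRender).flatten = pvF r false := by
        apply ih
        have h1 : r.length ≤ cs.length := hrdef ▸ List.length_dropWhile_le q cs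
        simp only [List.length_cons] at hl
        omega
      have hrun : ∀ d ∈ t, altOk d = altOk c := by
        intro d hd
        have := List.mem_takeWhile_imp (ht ▸ hd)
        simpa [hq] using this
      have hhead : ∀ d ∈ r.head?, altOk d = (!altOk c) := by
        intro d hd
        have h := List.head?_dropWhile_not q cs
        rw [← hrdef] at h
        rw [Option.mem_def] at hd
        rw [hd] at h
        simp only [hq] at h
        cases hoc : altOk c <;> cases hod : altOk d <;> simp_all
      simp only [List.map_cons, List.flatten_cons, hr]
      conv_rhs => rw [← hcs]
      by_cases hc : altOk c = true
      · have hruntrue : ∀ d ∈ t, altOk d = true := fun d hd => by rw [hrun d hd, hc]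
        have hheadfalse : ∀ d ∈ r.head?, altOk d = false := fun d hd => by
          rw [hhead d hd, hc]; rfl
        show altRender (c :: t) ++ pvF r false = pvF (c :: (t ++ r)) false
        rw [show pvF (c :: (t ++ r)) false
              = ['&', '"'] ++ [c] ++ pvF (t ++ r) true from by simp [pvF, hc]]
        rw [pvF_true_run t r hruntrue, pvF_true_of_head_not_ok r hheadfalse]
        simp [altRender, hc]
      · have hc' : altOk c = false := by simpa using hc
        have hrunfalse : ∀ d ∈ t, altOk d = false := fun d hd => by rw [hrun d hd, hc']
        show altRender (c :: t) ++ pvF r false = pvF (c :: (t ++ r)) false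
        rw [show pvF (c :: (t ++ r)) false
              = altChrw c ++ pvF (t ++ r) false from by simp [pvF, hc']]
        rw [pvF_false_run t r hrunfalse]
        simp [altRender, hc']

theorem chunks_eq_pvF (l : List Char) :
    ((altChunks l).map altRender).flatten = pvF l false :=
  chunks_eq_pvF_aux l.length l le_rfl

theorem VbsString_spec : Claim_equal_VbsString := by
  intro strInput default _
  unfold Spec_VbsString VbsString VbsString_alt
  simp only [List.isEmpty_iff_length_eq_zero]
  set s := (match strInput with
    | none => default
    | some t => if t.toList.length = 0 then default else t) with hs
  by_cases hlen : s.toList.length = 0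
  · simp [hlen]
  · simp only [if_neg hlen]
    have hA := foldA_eq s.toList [] false
    simp only [Bool.false_eq_true, if_false, List.nil_append] at hA
    rw [hA, chunks_eq_pvF]
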